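-- pv_equiv track=rewrite | github.com/sfeucht/annotation_evaluation | 3.topic_analysis.py | presence_of_narrative
-- ===== SOURCE A (Python) =====
-- def presence_of_narrative(Doc_container, t_dict, index): # produces a dict of narrative presence for each document (with 0 for
-- # no narrative and 1 for some narrative), called by p_of_nar_topic_correl_calc
--
--     rating_dict = {}
--
--     for topic_id in t_dict.keys():
--         for annotator in Doc_container.keys():
--             for doc_id in Doc_container[annotator].keys():
--
--                 ratings = Doc_container[annotator][doc_id]
--
--                 if doc_id == topic_id: # to match IDs across dicts
--
--                     if (ratings[index] == 'NA') or (ratings[index] == '0'): # adds 0 for no narrative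
--                         if(doc_id not in rating_dict):
--                             rating_dict[doc_id] = {}
--                             rating_dict[doc_id] = 0
--                     if (ratings[index] != 'NA') and (ratings[index] != '0'): # adds 1 for some narrative
--                         if(doc_id not in rating_dict):
--                             rating_dict[doc_id] = {}
--                             rating_dict[doc_id] = 1
--     return rating_dict
-- ===== SOURCE B (Python) =====
-- def presence_of_narrative(Doc_container, t_dict, index):
--     # One scan over the documents builds a first-occurrence table, then one
--     # projection pass over t_dict's keys classifies the stored ratings.
--     first_seen = {}
--     for annotator in Doc_container:
--         for doc_id, ratings in Doc_container[annotator].items():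
--             if doc_id in t_dict and doc_id not in first_seen:
--                 first_seen[doc_id] = ratings[index]
--     rating_dict = {}
--     for topic_id in t_dict:
--         if topic_id in first_seen:
--             r = first_seen[topic_id]
--             rating_dict[topic_id] = 0 if r == 'NA' or r == '0' else 1
--     return rating_dict
-- ===== Notes on version B (the rewrite author's own statement) =====
-- stated objective: alternative
-- what changed: Replaces A's topic x annotator x doc triple re-scan by a single pass over the documents building a first-seen rating table plus one projection pass over t_dict's keys (T*A*D work becomes A*D + T).
import Mathlib
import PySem

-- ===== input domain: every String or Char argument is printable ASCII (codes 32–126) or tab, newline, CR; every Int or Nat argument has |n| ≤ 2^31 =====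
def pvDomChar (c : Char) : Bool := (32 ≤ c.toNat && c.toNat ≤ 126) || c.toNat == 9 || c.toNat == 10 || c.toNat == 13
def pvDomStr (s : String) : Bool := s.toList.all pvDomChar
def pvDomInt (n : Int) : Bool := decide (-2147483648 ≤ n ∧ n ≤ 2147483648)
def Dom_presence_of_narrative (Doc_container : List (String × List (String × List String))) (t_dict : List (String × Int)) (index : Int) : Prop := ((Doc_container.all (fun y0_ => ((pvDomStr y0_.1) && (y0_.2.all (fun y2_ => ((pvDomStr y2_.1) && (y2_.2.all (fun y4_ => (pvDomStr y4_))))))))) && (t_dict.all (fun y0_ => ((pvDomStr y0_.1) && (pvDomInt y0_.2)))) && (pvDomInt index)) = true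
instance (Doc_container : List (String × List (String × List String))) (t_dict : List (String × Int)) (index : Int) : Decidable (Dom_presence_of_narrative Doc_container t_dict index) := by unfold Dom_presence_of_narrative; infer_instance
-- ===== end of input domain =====

-- B replaces A's topic×annotator×doc triple re-scan by one pass over the documents
-- building a first-seen rating table plus one projection pass over t_dict's keys.


-- ===== PORT A =====
def presence_of_narrative (Doc_container : List (String × List (String × List String))) (t_dict : List (String × Int)) (index : Int) : List (String × Int) :=
  let Doc : PySem.Dict String (PySem.Dict String (List String)) :=
    PySem.Dict.ofList (Doc_container.map (fun p => (p.1, PySem.Dict.ofList p.2)))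
  let t : PySem.Dict String Int := PySem.Dict.ofList t_dict
  let rating_dict : PySem.Dict String Int :=
    t.keys.foldl (fun rd topic_id =>
      Doc.keys.foldl (fun rd annotator =>
        let docs := Doc.getD annotator PySem.Dict.empty
        docs.keys.foldl (fun rd doc_id =>
          let ratings := docs.getD doc_id []
          if doc_id == topic_id then
            -- ratings[index]: IndexError is excluded by Pre_
            let r := (PySem.List.pyGet? ratings index).getD ""
            let rd := if r == "NA" || r == "0" then
                        (if !rd.contains doc_id then rd.insert doc_id 0 else rd)
                      else rd
            if !(r == "NA") && !(r == "0") then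
              (if !rd.contains doc_id then rd.insert doc_id 1 else rd)
            else rd
          else rd) rd) rd) PySem.Dict.empty
  rating_dict.items

-- ===== PORT B =====
def presence_of_narrative_alt (Doc_container : List (String × List (String × List String))) (t_dict : List (String × Int)) (index : Int) : List (String × Int) :=
  let Doc : PySem.Dict String (PySem.Dict String (List String)) :=
    PySem.Dict.ofList (Doc_container.map (fun p => (p.1, PySem.Dict.ofList p.2)))
  let t : PySem.Dict String Int := PySem.Dict.ofList t_dict
  let first_seen : PySem.Dict String String :=
    Doc.keys.foldl (fun fs annotator =>
      ((Doc.getD annotator PySem.Dict.empty).items).foldl (fun fs pr =>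
        if t.contains pr.1 && !fs.contains pr.1 then
          -- ratings[index]: IndexError is excluded by Pre_
          fs.insert pr.1 ((PySem.List.pyGet? pr.2 index).getD "")
        else fs) fs) PySem.Dict.empty
  let rating_dict : PySem.Dict String Int :=
    t.keys.foldl (fun rd topic_id =>
      match first_seen.get? topic_id with
      | some r => rd.insert topic_id (if r == "NA" || r == "0" then 0 else 1)
      | none => rd) PySem.Dict.empty
  rating_dict.items

-- ===== PRECONDITION & SPEC =====
-- Pre_ excludes exactly the inputs where A raises IndexError: some document whose
-- id is a key of t_dict has a ratings list for which ratings[index] is out of range.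
def Pre_presence_of_narrative (Doc_container : List (String × List (String × List String))) (t_dict : List (String × Int)) (index : Int) : Prop :=
  ∀ p ∈ (PySem.Dict.ofList (Doc_container.map (fun p => (p.1, PySem.Dict.ofList p.2)))).items,
    ∀ pr ∈ (PySem.Dict.items p.2),
      (PySem.Dict.ofList t_dict).contains pr.1 = true →
        PySem.Raise.InRange pr.2.length index
instance (Doc_container : List (String × List (String × List String))) (t_dict : List (String × Int)) (index : Int) : Decidable (Pre_presence_of_narrative Doc_container t_dict index) := by unfold Pre_presence_of_narrative; infer_instance

def pvWitness_presence_of_narrative : (List (String × List (String × List String))) × (List (String × Int)) × Int :=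
  ([("ann1", [("d1", ["NA", "2"]), ("d2", ["1"])]), ("ann2", [("d1", ["0"])])],
   [("d1", 7), ("d3", 2)], 0)

def Spec_presence_of_narrative (Doc_container : List (String × List (String × List String))) (t_dict : List (String × Int)) (index : Int) (out : List (String × Int)) : Prop := out = presence_of_narrative_alt Doc_container t_dict index
instance (Doc_container : List (String × List (String × List String))) (t_dict : List (String × Int)) (index : Int) (out : List (String × Int)) : Decidable (Spec_presence_of_narrative Doc_container t_dict index out) := by unfold Spec_presence_of_narrative; infer_instance

-- ===== CLAIM (what is proved, stated in full; the proofs are below) =====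
def Claim_equal_presence_of_narrative : Prop := ∀ (Doc_container : List (String × List (String × List String))) (t_dict : List (String × Int)) (index : Int), Dom_presence_of_narrative Doc_container t_dict index → Pre_presence_of_narrative Doc_container t_dict index → Spec_presence_of_narrative Doc_container t_dict index (presence_of_narrative Doc_container t_dict index)

-- ===== LEMMAS AND PROOFS =====


-- helper abbreviations for the proofs
def pvRate (index : Int) (rs : List String) : String := (PySem.List.pyGet? rs index).getD ""

def pvCls (r : String) : Int := if r == "NA" || r == "0" then 0 else 1

def pvStepA (index : Int) (k : String) (rd : PySem.Dict String Int) (pr : String × List String) : PySem.Dict String Int :=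
  if pr.1 == k then
    let r := pvRate index pr.2
    let rd := if r == "NA" || r == "0" then
                (if !rd.contains pr.1 then rd.insert pr.1 0 else rd)
              else rd
    if !(r == "NA") && !(r == "0") then
      (if !rd.contains pr.1 then rd.insert pr.1 1 else rd)
    else rd
  else rd

def pvStepB (t : PySem.Dict String Int) (index : Int) (fs : PySem.Dict String String) (pr : String × List String) : PySem.Dict String String :=
  if t.contains pr.1 && !fs.contains pr.1 then fs.insert pr.1 (pvRate index pr.2) else fs

-- every value stored by a foldl-insert loop comes from the pair list
theorem pvMemValuesFoldl {ν : Type} (l : List (String × ν)) (d : PySem.Dict String ν) (v : ν)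
    (h : v ∈ (l.foldl (fun d p => d.insert p.1 p.2) d).values) : v ∈ d.values ∨ v ∈ l.map (·.2) := by
  induction l generalizing d with
  | nil => exact Or.inl h
  | cons p l ih =>
    rcases ih (d.insert p.1 p.2) h with h' | h'
    · rcases PySem.Dict.mem_values_insert _ _ _ _ h' with h'' | h''
      · exact Or.inr (by simp [h''])
      · exact Or.inl h''
    · exact Or.inr (List.mem_cons_of_mem _ h')

-- the per-annotator dictionaries stored in Doc have duplicate-free key lists
theorem pvValNodup (l : List (String × List (String × List String))) (a : String) :
    ((PySem.Dict.ofList (l.map (fun p => (p.1, PySem.Dict.ofList p.2)))).getD a PySem.Dict.empty).keys.Nodup := by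
  set d := (PySem.Dict.ofList (l.map (fun p => (p.1, PySem.Dict.ofList p.2)))) with hd
  rw [PySem.Dict.getD_eq_get?_getD]
  cases hg : d.get? a with
  | none => exact PySem.Dict.nodup_keys_empty
  | some v =>
    have hmem : (a, v) ∈ d.items := PySem.Dict.mem_items_of_get?_eq_some d hg
    have hv : v ∈ d.values := by
      simp only [PySem.Dict.values]
      exact List.mem_map_of_mem hmem
    have : v ∈ (PySem.Dict.empty : PySem.Dict String (PySem.Dict String (List String))).values ∨
        v ∈ (l.map (fun p => (p.1, PySem.Dict.ofList p.2))).map (·.2) := by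
      apply pvMemValuesFoldl _ _ _ (by exact hv)
    rcases this with h | h
    · simp [PySem.Dict.empty, PySem.Dict.values] at h
    · simp only [List.map_map, List.mem_map] at h
      obtain ⟨p, _, hp⟩ := h
      simp only [Option.getD_some]
      rw [← hp]
      exact PySem.Dict.nodup_keys_ofList p.2

-- A's fold over a topic already present in rating_dict is a no-op
theorem pvFoldA_contains_true (index : Int) (k : String) (scan : List (String × List String))
    (rd : PySem.Dict String Int) (h : rd.contains k = true) :
    scan.foldl (pvStepA index k) rd = rd := by
  induction scan with
  | nil => rfl
  | cons pr scan ih =>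
    have hstep : pvStepA index k rd pr = rd := by
      unfold pvStepA
      by_cases hk : pr.1 = k
      · subst hk; simp [h]
      · simp [hk]
    simp [List.foldl_cons, hstep, ih]

-- A's fold over a fresh topic inserts the classification of the FIRST match
theorem pvFoldA_contains_false (index : Int) (k : String) (scan : List (String × List String))
    (rd : PySem.Dict String Int) (h : rd.contains k = false) :
    scan.foldl (pvStepA index k) rd =
      match scan.find? (fun pr => pr.1 == k) with
      | none => rd
      | some pr => rd.insert k (pvCls (pvRate index pr.2)) := by
  induction scan with
  | nil => rfl
  | cons pr scan ih =>
    by_cases hk : pr.1 = k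
    · have hstep : pvStepA index k rd pr = rd.insert k (pvCls (pvRate index pr.2)) := by
        unfold pvStepA pvCls
        subst hk
        by_cases hNA : pvRate index pr.2 = "NA"
        · simp [hNA, h]
        · by_cases h0 : pvRate index pr.2 = "0"
          · simp [h0, h]
          · simp [hNA, h0, h]
      rw [List.foldl_cons, hstep,
        pvFoldA_contains_true index k scan _ (PySem.Dict.contains_insert_self _ _ _)]
      simp [hk]
    · have hstep : pvStepA index k rd pr = rd := by
        unfold pvStepA; simp [hk]
      rw [List.foldl_cons, hstep, ih]
      have : (pr.1 == k) = false := by simp [hk]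
      simp [this]

-- B's first pass: what first_seen stores for each key
theorem pvFS_get? (t : PySem.Dict String Int) (index : Int) (scan : List (String × List String))
    (fs : PySem.Dict String String) (x : String) :
    (scan.foldl (pvStepB t index) fs).get? x =
      match fs.get? x with
      | some v => some v
      | none => if t.contains x then (scan.find? (fun pr => pr.1 == x)).map (fun pr => pvRate index pr.2) else none := by
  induction scan generalizing fs with
  | nil =>
    cases hg : fs.get? x <;> simp [hg]
  | cons pr scan ih =>
    rw [List.foldl_cons, ih]
    by_cases hk : pr.1 = x
    · subst hk
      cases hg : fs.get? pr.1 with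
      | some v =>
        have hc : fs.contains pr.1 = true := by
          rw [PySem.Dict.contains_eq_isSome_get?, hg]; rfl
        unfold pvStepB
        simp [hc, hg]
      | none =>
        have hc : fs.contains pr.1 = false := by
          rw [PySem.Dict.contains_eq_isSome_get?, hg]; rfl
        by_cases ht : t.contains pr.1 = true
        · have : pvStepB t index fs pr = fs.insert pr.1 (pvRate index pr.2) := by
            unfold pvStepB; simp [ht, hc]
          rw [this, PySem.Dict.get?_insert_self]
          simp [ht]
        · have ht' : t.contains pr.1 = false := by simpa using ht
          have : pvStepB t index fs pr = fs := by
            unfold pvStepB; simp [ht']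
          rw [this, hg]
          simp [ht']
    · have hne : (pr.1 == x) = false := by simp [hk]
      have hgx : (pvStepB t index fs pr).get? x = fs.get? x := by
        unfold pvStepB
        split
        · exact PySem.Dict.get?_insert_of_ne _ _ (fun h => hk h.symm)
        · rfl
      rw [hgx]
      cases fs.get? x <;> simp [hne]

-- the two second passes agree step by step over the (duplicate-free) topic keys
theorem pvMainFold (t : PySem.Dict String Int) (index : Int) (scan : List (String × List String))
    (ks : List String) (rd : PySem.Dict String Int)
    (hnd : ks.Nodup) (hks : ∀ k ∈ ks, t.contains k = true) (hrd : ∀ k ∈ ks, rd.contains k = false) :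
    ks.foldl (fun rd k => scan.foldl (pvStepA index k) rd) rd =
    ks.foldl (fun rd k =>
      match (scan.foldl (pvStepB t index) PySem.Dict.empty).get? k with
      | some r => rd.insert k (if r == "NA" || r == "0" then 0 else 1)
      | none => rd) rd := by
  induction ks generalizing rd with
  | nil => rfl
  | cons k ks ih =>
    have hrk : rd.contains k = false := hrd k (List.mem_cons_self ..)
    have hgfs : (scan.foldl (pvStepB t index) PySem.Dict.empty).get? k =
        (scan.find? (fun pr => pr.1 == k)).map (fun pr => pvRate index pr.2) := by
      rw [pvFS_get?]
      simp [PySem.Dict.get?_empty, hks k (List.mem_cons_self ..)]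
    rw [List.foldl_cons, List.foldl_cons, pvFoldA_contains_false index k scan rd hrk, hgfs]
    have hnd' : ks.Nodup := hnd.of_cons
    have hkne : ∀ k' ∈ ks, k' ≠ k := fun k' hk' => by
      rintro rfl; exact (List.nodup_cons.mp hnd).1 hk'
    cases hfind : scan.find? (fun pr => pr.1 == k) with
    | none =>
      exact ih rd hnd' (fun k' h => hks k' (List.mem_cons_of_mem _ h)) (fun k' h => hrd k' (List.mem_cons_of_mem _ h))
    | some pr =>
      simp only [Option.map_some]
      apply ih _ hnd' (fun k' h => hks k' (List.mem_cons_of_mem _ h))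
      intro k' h
      rw [PySem.Dict.contains_insert]
      simp [hkne k' h, hrd k' (List.mem_cons_of_mem _ h)]

-- ===== VERDICT (by name: the statement is the Claim_ definition above) =====
theorem presence_of_narrative_spec : Claim_equal_presence_of_narrative := by
  intro DC td index _ _
  unfold Spec_presence_of_narrative presence_of_narrative presence_of_narrative_alt
  set Doc := PySem.Dict.ofList (DC.map (fun p => (p.1, PySem.Dict.ofList p.2))) with hDoc
  set t := PySem.Dict.ofList td with ht
  set scan := Doc.keys.flatMap (fun a => (Doc.getD a PySem.Dict.empty).items) with hscan
  -- flatten A's triple loop into a single scan fold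
  have hA : ∀ (rd : PySem.Dict String Int) (k : String),
      Doc.keys.foldl (fun rd annotator =>
        let docs := Doc.getD annotator PySem.Dict.empty
        docs.keys.foldl (fun rd doc_id =>
          let ratings := docs.getD doc_id []
          if doc_id == k then
            let r := (PySem.List.pyGet? ratings index).getD ""
            let rd := if r == "NA" || r == "0" then
                        (if !rd.contains doc_id then rd.insert doc_id 0 else rd)
                      else rd
            if !(r == "NA") && !(r == "0") then
              (if !rd.contains doc_id then rd.insert doc_id 1 else rd)
            else rd
          else rd) rd) rd = scan.foldl (pvStepA index k) rd := by
    intro rd k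
    rw [hscan, List.foldl_flatMap]
    apply PySem.List.foldl_congr_mem
    intro rd' a _
    rw [PySem.Dict.items_eq_map_keys (Doc.getD a PySem.Dict.empty) (by rw [hDoc]; exact pvValNodup DC a) [],
      List.foldl_map]
    rfl
  -- flatten B's first pass the same way
  have hB : Doc.keys.foldl (fun fs annotator =>
        ((Doc.getD annotator PySem.Dict.empty).items).foldl (fun fs pr =>
          if t.contains pr.1 && !fs.contains pr.1 then
            fs.insert pr.1 ((PySem.List.pyGet? pr.2 index).getD "")
          else fs) fs) PySem.Dict.empty = scan.foldl (pvStepB t index) PySem.Dict.empty := by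
    rw [hscan, List.foldl_flatMap]; rfl
  simp only [hB]
  have : ∀ (rd : PySem.Dict String Int), (∀ k ∈ t.keys, rd.contains k = false) →
      (t.keys.foldl (fun rd k =>
        Doc.keys.foldl (fun rd annotator =>
          let docs := Doc.getD annotator PySem.Dict.empty
          docs.keys.foldl (fun rd doc_id =>
            let ratings := docs.getD doc_id []
            if doc_id == k then
              let r := (PySem.List.pyGet? ratings index).getD ""
              let rd := if r == "NA" || r == "0" then
                          (if !rd.contains doc_id then rd.insert doc_id 0 else rd)
                        else rd
              if !(r == "NA") && !(r == "0") then
                (if !rd.contains doc_id then rd.insert doc_id 1 else rd)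
              else rd
            else rd) rd) rd) rd).items
      = (t.keys.foldl (fun rd k =>
          match (scan.foldl (pvStepB t index) PySem.Dict.empty).get? k with
          | some r => rd.insert k (if r == "NA" || r == "0" then 0 else 1)
          | none => rd) rd).items := by
    intro rd hrd
    have := pvMainFold t index scan t.keys rd (by rw [ht]; exact PySem.Dict.nodup_keys_ofList td)
      (fun k hk => (PySem.Dict.contains_iff_mem_keys t k).mpr hk) hrd
    rw [← this]
    congr 1
    apply PySem.List.foldl_congr_mem
    intro rd' k _
    exact hA rd' k
  exact this PySem.Dict.empty (fun k _ => PySem.Dict.contains_empty k)
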